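-- pv_equiv track=rewrite | github.com/davidrossdegroot/daily-office | bin/map_common_prayers.py | infer_common_type
-- ===== SOURCE A (Python) =====
-- def infer_common_type(remembrance: str, observance: str) -> str:
--     """Infer common prayer category from remembrance/observance text."""
--     text = f"{remembrance} {observance}".strip().lower()
--     if not text:
--         return ""
--
--     # Priority matters for multi-role titles (for example "bishop and missionary").
--     if "martyr" in text:
--         return "common of a martyr"
--
--     missionary_hints = (
--         "missionary",
--         "apostle",
--         "evangelist",
--         "illuminator",
--     )
--     if any(hint in text for hint in missionary_hints):
--         return "common of a missionary or evangelist"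
--
--     if "reformer of the church" in text or "reformer" in text:
--         return "common of a reformer of the church"
--
--     if "ecumen" in text:
--         return "common of an ecumenist"
--
--     monastic_hints = ("abbot", "abbess", "monastic", "religious")
--     if any(hint in text for hint in monastic_hints):
--         return "common of a monastic or religious"
--
--     renewer_hints = ("justice", "renewer", "social", "abolition")
--     if any(hint in text for hint in renewer_hints):
--         return "common of a renewer of society"
--
--     pastor_hints = ("bishop", "priest", "pastor", "archbishop", "deacon")
--     if any(hint in text for hint in pastor_hints):
--         return "common of a pastor"
--
--     if "teacher of the faith" in text or "doctor of the church" in text: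
--         return "common of a teacher of the faith"
--
--     return "common of any commemoration"
-- ===== SOURCE B (Python) =====
-- _PRIORITY = {
--     "martyr": 0,
--     "missionary": 1, "apostle": 1, "evangelist": 1, "illuminator": 1,
--     "reformer": 2,
--     "ecumen": 3,
--     "abbot": 4, "abbess": 4, "monastic": 4, "religious": 4,
--     "justice": 5, "renewer": 5, "social": 5, "abolition": 5,
--     "bishop": 6, "priest": 6, "pastor": 6, "archbishop": 6, "deacon": 6,
--     "teacher of the faith": 7, "doctor of the church": 7,
-- }
--
-- _LABELS = [
--     "common of a martyr",
--     "common of a missionary or evangelist",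
--     "common of a reformer of the church",
--     "common of an ecumenist",
--     "common of a monastic or religious",
--     "common of a renewer of society",
--     "common of a pastor",
--     "common of a teacher of the faith",
--     "common of any commemoration",
-- ]
--
--
-- def infer_common_type(remembrance: str, observance: str) -> str:
--     """Infer common prayer category from remembrance/observance text."""
--     text = f"{remembrance} {observance}".strip().lower()
--     if not text:
--         return ""
--     # Single left-to-right scan over text positions: at each position record
--     # the best (lowest) priority of any keyword starting there; the winning
--     # priority picks the label.
--     best = len(_LABELS) - 1
--     for i in range(len(text)):
--         for kw, pr in _PRIORITY.items():
--             if pr < best and text.startswith(kw, i):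
--                 best = pr
--     return _LABELS[best]
-- ===== Notes on version B (the rewrite author's own statement) =====
-- stated objective: alternative
-- what changed: A's eight-branch priority cascade of whole-text 'in' tests is replaced by a single left-to-right scan over text positions against one keyword->priority dictionary, tracking the minimum matched priority and indexing a label table with it (first-match cascade vs min-over-all-matches scan).
import Mathlib
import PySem

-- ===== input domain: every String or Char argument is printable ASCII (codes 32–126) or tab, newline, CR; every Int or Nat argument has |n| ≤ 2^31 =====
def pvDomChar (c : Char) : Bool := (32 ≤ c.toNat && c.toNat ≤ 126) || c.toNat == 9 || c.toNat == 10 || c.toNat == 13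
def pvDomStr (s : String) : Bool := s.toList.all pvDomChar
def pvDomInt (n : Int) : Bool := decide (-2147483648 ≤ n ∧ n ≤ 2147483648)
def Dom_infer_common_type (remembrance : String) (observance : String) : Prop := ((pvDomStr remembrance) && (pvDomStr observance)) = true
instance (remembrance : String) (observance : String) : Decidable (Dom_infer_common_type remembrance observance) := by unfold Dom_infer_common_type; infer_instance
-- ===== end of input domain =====

-- B replaces A's eight-branch priority cascade of whole-text substring tests by a single
-- left-to-right scan over text positions against one keyword→priority table, keeping the
-- minimum matched priority and indexing a label table with it (alternative decomposition).

-- ===== PORT A =====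
def infer_common_type (remembrance : String) (observance : String) : String :=
  let text := PySem.Chars.lower (PySem.Chars.strip (remembrance.toList ++ ' ' :: observance.toList))
  if text = [] then ""
  else if PySem.Chars.isIn "martyr".toList text then "common of a martyr"
  else if ["missionary", "apostle", "evangelist", "illuminator"].any
      (fun h => PySem.Chars.isIn h.toList text) then "common of a missionary or evangelist"
  else if PySem.Chars.isIn "reformer of the church".toList text
      || PySem.Chars.isIn "reformer".toList text then "common of a reformer of the church"
  else if PySem.Chars.isIn "ecumen".toList text then "common of an ecumenist"
  else if ["abbot", "abbess", "monastic", "religious"].any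
      (fun h => PySem.Chars.isIn h.toList text) then "common of a monastic or religious"
  else if ["justice", "renewer", "social", "abolition"].any
      (fun h => PySem.Chars.isIn h.toList text) then "common of a renewer of society"
  else if ["bishop", "priest", "pastor", "archbishop", "deacon"].any
      (fun h => PySem.Chars.isIn h.toList text) then "common of a pastor"
  else if PySem.Chars.isIn "teacher of the faith".toList text
      || PySem.Chars.isIn "doctor of the church".toList text then "common of a teacher of the faith"
  else "common of any commemoration"

-- ===== PORT B =====
def pvPriority : List (List Char × Nat) :=
  [ ("martyr".toList, 0),
    ("missionary".toList, 1), ("apostle".toList, 1), ("evangelist".toList, 1), ("illuminator".toList, 1),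
    ("reformer".toList, 2),
    ("ecumen".toList, 3),
    ("abbot".toList, 4), ("abbess".toList, 4), ("monastic".toList, 4), ("religious".toList, 4),
    ("justice".toList, 5), ("renewer".toList, 5), ("social".toList, 5), ("abolition".toList, 5),
    ("bishop".toList, 6), ("priest".toList, 6), ("pastor".toList, 6), ("archbishop".toList, 6), ("deacon".toList, 6),
    ("teacher of the faith".toList, 7), ("doctor of the church".toList, 7) ]

def pvLabels : List String :=
  [ "common of a martyr",
    "common of a missionary or evangelist",
    "common of a reformer of the church",
    "common of an ecumenist",
    "common of a monastic or religious",
    "common of a renewer of society",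
    "common of a pastor",
    "common of a teacher of the faith",
    "common of any commemoration" ]

-- positional scan: at each position, try every keyword; keep the minimum priority matched
def pvScan : List Char → Nat → Nat
  | [], best => best
  | c :: rest, best =>
      pvScan rest (pvPriority.foldl
        (fun b kp => if kp.2 < b ∧ kp.1.isPrefixOf (c :: rest) then kp.2 else b) best)

def infer_common_type_alt (remembrance : String) (observance : String) : String :=
  let text := PySem.Chars.lower (PySem.Chars.strip (remembrance.toList ++ ' ' :: observance.toList))
  if text = [] then ""
  else pvLabels.getD (pvScan text (pvLabels.length - 1)) ""

-- ===== PRECONDITION & SPEC =====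
def Spec_infer_common_type (remembrance : String) (observance : String) (out : String) : Prop := out = infer_common_type_alt remembrance observance
instance (remembrance : String) (observance : String) (out : String) : Decidable (Spec_infer_common_type remembrance observance out) := by unfold Spec_infer_common_type; infer_instance

-- ===== CLAIM (what is proved, stated in full; the proofs are below) =====
def Claim_equal_infer_common_type : Prop := ∀ (remembrance : String) (observance : String), Dom_infer_common_type remembrance observance → Spec_infer_common_type remembrance observance (infer_common_type remembrance observance)

-- ===== LEMMAS AND PROOFS =====

-- abstract min-steps used to reason about pvScan's two folds
def pvStepPre (s : List Char) (b : Nat) (kp : List Char × Nat) : Nat :=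
  if kp.1.isPrefixOf s then min b kp.2 else b

def pvStepIn (t : List Char) (b : Nat) (kp : List Char × Nat) : Nat :=
  if PySem.Chars.isIn kp.1 t then min b kp.2 else b

theorem pv_step_eq (s : List Char) :
    (fun (b : Nat) (kp : List Char × Nat) => if kp.2 < b ∧ kp.1.isPrefixOf s then kp.2 else b)
      = pvStepPre s := by
  funext b kp
  unfold pvStepPre
  by_cases hp : kp.1.isPrefixOf s
  · simp only [hp, and_true, if_true]
    split <;> omega
  · simp [hp]

theorem pv_fold_min_gen (g : Nat → (List Char × Nat) → Nat)
    (hg : ∀ b v kp, g (min b v) kp = min (g b kp) v) :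
    ∀ (l : List (List Char × Nat)) (b v : Nat),
      List.foldl g (min b v) l = min (List.foldl g b l) v := by
  intro l
  induction l with
  | nil => intro b v; simp
  | cons kp l ih => intro b v; simp only [List.foldl_cons, hg]; exact ih _ _

theorem pv_stepPre_min (s : List Char) (b v : Nat) (kp : List Char × Nat) :
    pvStepPre s (min b v) kp = min (pvStepPre s b kp) v := by
  unfold pvStepPre; split <;> omega

theorem pv_isIn_cons (kw : List Char) (c : Char) (rest : List Char) :
    PySem.Chars.isIn kw (c :: rest) = (kw.isPrefixOf (c :: rest) || PySem.Chars.isIn kw rest) := by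
  rw [Bool.eq_iff_iff]
  simp only [Bool.or_eq_true, PySem.Chars.isIn_iff_infix, List.isPrefixOf_iff_prefix,
    List.infix_cons_iff]

theorem pv_push (c : Char) (rest : List Char) (kp : List Char × Nat) :
    ∀ (l : List (List Char × Nat)) (x : Nat),
      pvStepIn rest (List.foldl (pvStepPre (c :: rest)) x l) kp
        = List.foldl (pvStepPre (c :: rest)) (pvStepIn rest x kp) l := by
  intro l x
  unfold pvStepIn
  split
  · exact (pv_fold_min_gen (pvStepPre (c :: rest)) (pv_stepPre_min (c :: rest)) l x kp.2).symm
  · rfl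

theorem pv_combine (c : Char) (rest : List Char) (kp : List Char × Nat) (b : Nat) :
    pvStepIn rest (pvStepPre (c :: rest) b kp) kp = pvStepIn (c :: rest) b kp := by
  unfold pvStepIn pvStepPre
  rw [pv_isIn_cons]
  by_cases h1 : kp.1.isPrefixOf (c :: rest) <;>
    by_cases h2 : PySem.Chars.isIn kp.1 rest <;> simp [h1, h2]

theorem pv_interleave (c : Char) (rest : List Char) :
    ∀ (l : List (List Char × Nat)) (b : Nat),
      List.foldl (pvStepIn rest) (List.foldl (pvStepPre (c :: rest)) b l) l
        = List.foldl (pvStepIn (c :: rest)) b l := by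
  intro l
  induction l with
  | nil => intro b; rfl
  | cons kp l ih =>
      intro b
      simp only [List.foldl_cons]
      rw [pv_push, pv_combine]
      exact ih _

theorem pv_fold_nil (l : List (List Char × Nat)) (h : ∀ kp ∈ l, kp.1 ≠ ([] : List Char)) :
    ∀ b, List.foldl (pvStepIn []) b l = b := by
  induction l with
  | nil => intro b; rfl
  | cons kp l ih =>
      intro b
      have hne := h kp (by simp)
      have hin : PySem.Chars.isIn kp.1 [] = false := by
        rw [PySem.Chars.isIn_eq_false_iff]
        simpa [List.infix_nil] using hne
      simp only [List.foldl_cons, pvStepIn, hin, Bool.false_eq_true, if_false]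
      exact ih (fun kp' hm => h kp' (by simp [hm])) b

theorem pv_scan_eq : ∀ (t : List Char) (b : Nat),
    pvScan t b = pvPriority.foldl (pvStepIn t) b := by
  intro t
  induction t with
  | nil =>
      intro b
      rw [pvScan]
      exact (pv_fold_nil pvPriority (by decide) b).symm
  | cons c rest ih =>
      intro b
      rw [pvScan, pv_step_eq, ih, pv_interleave]

theorem pv_group_fold (t : List Char) (p : Nat) :
    ∀ (l : List (List Char × Nat)), (∀ kp ∈ l, kp.2 = p) → ∀ b,
      List.foldl (pvStepIn t) b l
        = if l.any (fun kp => PySem.Chars.isIn kp.1 t) then min b p else b := by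
  intro l
  induction l with
  | nil => intro _ b; simp
  | cons kp l ih =>
      intro h b
      have hp : kp.2 = p := h kp (by simp)
      have ih' := ih (fun kp' hm => h kp' (by simp [hm]))
      simp only [List.foldl_cons, List.any_cons]
      by_cases hin : PySem.Chars.isIn kp.1 t
      · have hb : pvStepIn t b kp = min b p := by unfold pvStepIn; simp [hin, hp]
        have hT : PySem.Chars.isIn kp.1 t = true := hin
        rw [hb, ih' (min b p)]
        simp only [hT, Bool.true_or, if_true]
        split <;> omega
      · have hb : pvStepIn t b kp = b := by unfold pvStepIn; simp [hin]
        have hF : PySem.Chars.isIn kp.1 t = false := by simpa using hin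
        rw [hb, ih' b]
        simp only [hF, Bool.false_or]

-- A tests 'reformer of the church' OR 'reformer'; since the former contains the latter,
-- the OR equals the 'reformer' test alone.
theorem pv_reformer_or (t : List Char) :
    (PySem.Chars.isIn "reformer of the church".toList t
      || PySem.Chars.isIn "reformer".toList t) = PySem.Chars.isIn "reformer".toList t := by
  cases h : PySem.Chars.isIn "reformer".toList t with
  | true => simp
  | false =>
    simp only [Bool.or_false]
    rw [PySem.Chars.isIn_eq_false_iff] at h
    rw [← Bool.not_eq_true, PySem.Chars.isIn_iff_infix]
    intro hinf
    exact h (List.IsInfix.trans (by decide) hinf)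

-- ===== VERDICT (by name: the statement is the Claim_ definition above) =====
theorem infer_common_type_spec : Claim_equal_infer_common_type := by
  intro remembrance observance _
  unfold Spec_infer_common_type infer_common_type infer_common_type_alt
  set text := PySem.Chars.lower (PySem.Chars.strip (remembrance.toList ++ ' ' :: observance.toList)) with htext
  by_cases h0 : text = []
  · simp [h0]
  · simp only [h0, if_false]
    rw [show pvLabels.length - 1 = 8 from rfl, pv_scan_eq]
    rw [show pvPriority
        = [("martyr".toList, 0)]
          ++ ([("missionary".toList, 1), ("apostle".toList, 1), ("evangelist".toList, 1), ("illuminator".toList, 1)]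
          ++ ([("reformer".toList, 2)]
          ++ ([("ecumen".toList, 3)]
          ++ ([("abbot".toList, 4), ("abbess".toList, 4), ("monastic".toList, 4), ("religious".toList, 4)]
          ++ ([("justice".toList, 5), ("renewer".toList, 5), ("social".toList, 5), ("abolition".toList, 5)]
          ++ ([("bishop".toList, 6), ("priest".toList, 6), ("pastor".toList, 6), ("archbishop".toList, 6), ("deacon".toList, 6)]
          ++ [("teacher of the faith".toList, 7), ("doctor of the church".toList, 7)])))))) from rfl]
    rw [List.foldl_append, List.foldl_append, List.foldl_append, List.foldl_append,
      List.foldl_append, List.foldl_append, List.foldl_append]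
    rw [pv_group_fold text 0 [("martyr".toList, 0)] (by decide)]
    rw [pv_group_fold text 1 [("missionary".toList, 1), ("apostle".toList, 1), ("evangelist".toList, 1), ("illuminator".toList, 1)] (by decide)]
    rw [pv_group_fold text 2 [("reformer".toList, 2)] (by decide)]
    rw [pv_group_fold text 3 [("ecumen".toList, 3)] (by decide)]
    rw [pv_group_fold text 4 [("abbot".toList, 4), ("abbess".toList, 4), ("monastic".toList, 4), ("religious".toList, 4)] (by decide)]
    rw [pv_group_fold text 5 [("justice".toList, 5), ("renewer".toList, 5), ("social".toList, 5), ("abolition".toList, 5)] (by decide)]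
    rw [pv_group_fold text 6 [("bishop".toList, 6), ("priest".toList, 6), ("pastor".toList, 6), ("archbishop".toList, 6), ("deacon".toList, 6)] (by decide)]
    rw [pv_group_fold text 7 [("teacher of the faith".toList, 7), ("doctor of the church".toList, 7)] (by decide)]
    rw [pv_reformer_or]
    simp only [List.any_cons, List.any_nil, Bool.or_false]
    by_cases h1 : PySem.Chars.isIn "martyr".toList text = true <;>
      by_cases h2 : (PySem.Chars.isIn "missionary".toList text ||
        (PySem.Chars.isIn "apostle".toList text ||
          (PySem.Chars.isIn "evangelist".toList text || PySem.Chars.isIn "illuminator".toList text))) = true <;>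
      by_cases h3 : PySem.Chars.isIn "reformer".toList text = true <;>
      by_cases h4 : PySem.Chars.isIn "ecumen".toList text = true <;>
      by_cases h5 : (PySem.Chars.isIn "abbot".toList text ||
        (PySem.Chars.isIn "abbess".toList text ||
          (PySem.Chars.isIn "monastic".toList text || PySem.Chars.isIn "religious".toList text))) = true <;>
      by_cases h6 : (PySem.Chars.isIn "justice".toList text ||
        (PySem.Chars.isIn "renewer".toList text ||
          (PySem.Chars.isIn "social".toList text || PySem.Chars.isIn "abolition".toList text))) = true <;>
      by_cases h7 : (PySem.Chars.isIn "bishop".toList text ||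
        (PySem.Chars.isIn "priest".toList text ||
          (PySem.Chars.isIn "pastor".toList text ||
            (PySem.Chars.isIn "archbishop".toList text || PySem.Chars.isIn "deacon".toList text)))) = true <;>
      by_cases h8 : (PySem.Chars.isIn "teacher of the faith".toList text ||
        PySem.Chars.isIn "doctor of the church".toList text) = true <;>
      simp only [h1, h2, h3, h4, h5, h6, h7, h8, if_true] <;> rfl
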